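-- pv_equiv track=rewrite | github.com/RajkumarYadav777/DSAlgo | STRINGS/REVERSEALNUMS/forloop.py | rev_only_alnums
-- ===== SOURCE A (Python) =====
-- def rev_only_alnums(s):
--     alnums = [ch for ch in s if ch.isalnum()]
--
--     res = []
--
--     for char in s:
--
--         if char.isalnum():
--             res.append(alnums.pop())
--
--         else:
--             res.append(char)
--
--     return ''.join(res)
-- ===== SOURCE B (Python) =====
-- def rev_only_alnums(s):
--     cs = list(s)
--     i, j = 0, len(cs) - 1
--     while i < j:
--         if not cs[i].isalnum():
--             i += 1
--         elif not cs[j].isalnum():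
--             j -= 1
--         else:
--             cs[i], cs[j] = cs[j], cs[i]
--             i += 1
--             j -= 1
--     return ''.join(cs)
-- ===== Notes on version B (the rewrite author's own statement) =====
-- stated objective: alternative
-- what changed: Replaces A's extract-all-alnums-then-rebuild-with-pop pass by an in-place two-pointer sweep that swaps symmetric alnum pairs, using O(1) extra space beyond the char buffer.
import Mathlib
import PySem

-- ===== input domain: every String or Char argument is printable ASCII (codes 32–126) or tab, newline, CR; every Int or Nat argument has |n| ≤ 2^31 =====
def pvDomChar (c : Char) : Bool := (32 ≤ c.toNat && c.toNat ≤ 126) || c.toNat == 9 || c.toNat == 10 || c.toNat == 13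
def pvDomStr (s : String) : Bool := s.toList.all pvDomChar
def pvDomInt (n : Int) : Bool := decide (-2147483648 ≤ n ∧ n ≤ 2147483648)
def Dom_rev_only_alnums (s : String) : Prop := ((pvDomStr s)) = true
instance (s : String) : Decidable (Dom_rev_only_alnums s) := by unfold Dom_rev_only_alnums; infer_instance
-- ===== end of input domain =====

-- B replaces A's extract-alnums-then-rebuild-with-pop pass by an in-place two-pointer
-- sweep swapping symmetric alnum pairs (objective: alternative, O(1) extra space).

-- ===== PORT A =====
-- loop over s with state (alnums, res); `alnums.pop()` = take the last element.
-- The `none` branch of getLast? is unreachable (Python would raise IndexError there,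
-- but the pop count always matches the filter count).
def pvGoA : List Char → List Char → List Char
  | [], _ => []
  | c :: rest, al =>
    if PySem.Chars.isalnum c then
      match al.getLast? with
      | some x => x :: pvGoA rest al.dropLast
      | none => c :: pvGoA rest al
    else c :: pvGoA rest al

def rev_only_alnums (s : String) : String :=
  String.mk (pvGoA s.toList (s.toList.filter PySem.Chars.isalnum))

-- ===== PORT B =====
-- two-pointer sweep over the char list; cs[i]/cs[j] are in range whenever read
-- (i < j < cs.length), so getD's default is unreachable.  j starts at len-1; for the
-- empty string Nat truncation gives j = 0, and the loop guard 0 < 0 fails just as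
-- Python's 0 < -1 does.
def pvGoB (cs : List Char) (i j : Nat) : List Char :=
  if _h : i < j then
    if ¬ PySem.Chars.isalnum (cs.getD i ' ') then pvGoB cs (i+1) j
    else if ¬ PySem.Chars.isalnum (cs.getD j ' ') then pvGoB cs i (j-1)
    else pvGoB ((cs.set i (cs.getD j ' ')).set j (cs.getD i ' ')) (i+1) (j-1)
  else cs
termination_by j - i
decreasing_by all_goals omega

def rev_only_alnums_alt (s : String) : String :=
  String.mk (pvGoB s.toList 0 (s.toList.length - 1))

-- ===== PRECONDITION & SPEC =====
def Spec_rev_only_alnums (s : String) (out : String) : Prop := out = rev_only_alnums_alt s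
instance (s : String) (out : String) : Decidable (Spec_rev_only_alnums s out) := by unfold Spec_rev_only_alnums; infer_instance

-- ===== CLAIM (what is proved, stated in full; the proofs are below) =====
def Claim_equal_rev_only_alnums : Prop := ∀ (s : String), Dom_rev_only_alnums s → Spec_rev_only_alnums s (rev_only_alnums s)

-- ===== LEMMAS AND PROOFS =====

-- The common characterisation: keep non-alnums, fill alnum slots from the front of ts.
def pvMerge : List Char → List Char → List Char
  | [], _ => []
  | c :: cs, ts =>
    if PySem.Chars.isalnum c then
      match ts with
      | t :: ts' => t :: pvMerge cs ts'
      | [] => c :: pvMerge cs []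
    else c :: pvMerge cs ts

def pvSpec (l : List Char) : List Char :=
  pvMerge l ((l.filter PySem.Chars.isalnum).reverse)

theorem pvMerge_append : ∀ (l r ts rest : List Char),
    ts.length = (l.filter PySem.Chars.isalnum).length →
    pvMerge (l ++ r) (ts ++ rest) = pvMerge l ts ++ pvMerge r rest := by
  intro l
  induction l with
  | nil =>
    intro r ts rest h
    simp at h
    subst h
    simp [pvMerge]
  | cons c cs ih =>
    intro r ts rest h
    by_cases hc : PySem.Chars.isalnum c
    · simp [hc] at h
      cases ts with
      | nil => simp at h
      | cons t ts' =>
        simp at h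
        simp only [List.cons_append, pvMerge, hc, if_true]
        rw [ih r ts' rest h]
    · simp [hc] at h
      simp only [List.cons_append, pvMerge, hc, Bool.false_eq_true, if_false]
      rw [ih r ts rest h]

theorem pvGoA_eq_merge : ∀ (l ts : List Char), pvGoA l ts.reverse = pvMerge l ts := by
  intro l
  induction l with
  | nil => intro ts; simp [pvGoA, pvMerge]
  | cons c cs ih =>
    intro ts
    by_cases hc : PySem.Chars.isalnum c
    · cases ts with
      | nil =>
        simp only [List.reverse_nil, pvGoA, pvMerge, hc, if_true, List.getLast?_nil]
        exact congrArg _ (by simpa using ih [])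
      | cons t ts' =>
        have h1 : (t :: ts').reverse.getLast? = some t := by
          rw [List.getLast?_reverse]; rfl
        have h2 : (t :: ts').reverse.dropLast = ts'.reverse := by
          rw [List.dropLast_reverse]; rfl
        simp only [pvGoA, pvMerge, hc, if_true, h1, h2]
        rw [ih ts']
    · simp only [pvGoA, pvMerge, hc, Bool.false_eq_true, if_false]
      rw [ih ts]

theorem pvSpec_nil : pvSpec [] = [] := by simp [pvSpec, pvMerge]

theorem pvSpec_single (c : Char) : pvSpec [c] = [c] := by
  by_cases hc : PySem.Chars.isalnum c <;> simp [pvSpec, pvMerge, hc]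

theorem pvSpec_cons_not (c : Char) (t : List Char) (hc : ¬ PySem.Chars.isalnum c) :
    pvSpec (c :: t) = c :: pvSpec t := by
  simp [pvSpec, pvMerge, hc]

theorem pvSpec_append_not (l : List Char) (b : Char) (hb : ¬ PySem.Chars.isalnum b) :
    pvSpec (l ++ [b]) = pvSpec l ++ [b] := by
  unfold pvSpec
  have hf : (l ++ [b]).filter PySem.Chars.isalnum = l.filter PySem.Chars.isalnum := by
    simp [hb]
  rw [hf]
  have := pvMerge_append l [b] ((l.filter PySem.Chars.isalnum).reverse) [] (by simp)
  simp only [List.append_nil] at this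
  rw [this]
  simp [pvMerge, hb]

theorem pvSpec_swap (a b : Char) (m : List Char)
    (ha : PySem.Chars.isalnum a) (hb : PySem.Chars.isalnum b) :
    pvSpec (a :: m ++ [b]) = b :: pvSpec m ++ [a] := by
  unfold pvSpec
  have hf : ((a :: m ++ [b]).filter PySem.Chars.isalnum).reverse
      = b :: ((m.filter PySem.Chars.isalnum).reverse ++ [a]) := by
    simp [ha, hb]
  rw [hf]
  show pvMerge (a :: (m ++ [b])) _ = _
  rw [pvMerge]
  simp only [ha, if_true]
  have := pvMerge_append m [b] ((m.filter PySem.Chars.isalnum).reverse) [a] (by simp)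
  rw [this]
  simp [pvMerge, hb]

-- the terminated two-pointer state: a segment of length ≤ 1 is already its own spec
theorem pvGoB_base (cs : List Char) (i j : Nat) (hn : ¬ i < j) (hij : i ≤ j + 1)
    (hj : j < cs.length) :
    cs = cs.take i ++ pvSpec ((cs.drop i).take (j + 1 - i)) ++ cs.drop (j + 1) := by
  rcases Nat.lt_or_ge i (j + 1) with h | h
  · have hieq : i = j := by omega
    subst hieq
    have h1 : i + 1 - i = 1 := by omega
    have hd : cs.drop i = cs[i] :: cs.drop (i + 1) := List.drop_eq_getElem_cons hj
    have h2 : (cs[i] :: cs.drop (i + 1)).take 1 = [cs[i]] := rfl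
    rw [h1, hd, h2, pvSpec_single]
    conv_lhs => rw [← List.take_append_drop i cs, hd]
    simp
  · have hieq : i = j + 1 := by omega
    subst hieq
    simp [pvSpec_nil]

-- swapping cs[i] and cs[j] (i < j), written as explicit take/drop pieces
theorem pvSwap_decomp (cs : List Char) (i j : Nat) (x y : Char) (hij : i < j)
    (hj : j < cs.length) (hi : i < cs.length) :
    (cs.set i x).set j y
      = cs.take i ++ x :: (((cs.drop (i+1)).take (j - i - 1)) ++ y :: cs.drop (j+1)) := by
  rw [List.set_eq_take_cons_drop _ hi]
  have hlen : (cs.take i ++ x :: cs.drop (i+1)).length = cs.length := by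
    simp; omega
  rw [List.set_eq_take_cons_drop _ (by rw [hlen]; exact hj)]
  have hti : (cs.take i).length = i := by simp; omega
  have hjsplit : j = (cs.take i).length + (j - i) := by omega
  have htake : (cs.take i ++ x :: cs.drop (i+1)).take j
      = cs.take i ++ x :: (cs.drop (i+1)).take (j - i - 1) := by
    conv_lhs => rw [hjsplit]
    rw [List.take_length_add_append]
    congr 1
    obtain ⟨k, hk⟩ : ∃ k, j - i = k + 1 := ⟨j - i - 1, by omega⟩
    rw [hk, List.take_succ_cons]
    simp
  have hdrop : (cs.take i ++ x :: cs.drop (i+1)).drop (j + 1) = cs.drop (j + 1) := by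
    have hjsplit2 : j + 1 = (cs.take i).length + (j - i + 1) := by omega
    conv_lhs => rw [hjsplit2]
    rw [List.drop_length_add_append]
    have h7 : j - i + 1 = (j - i) + 1 := rfl
    rw [h7, List.drop_succ_cons, List.drop_drop]
    congr 1
    omega
  rw [htake, hdrop]
  simp

theorem pvGoB_eq : ∀ (n : Nat) (cs : List Char) (i j : Nat), j - i ≤ n → i ≤ j + 1 → j < cs.length →
    pvGoB cs i j = cs.take i ++ pvSpec ((cs.drop i).take (j + 1 - i)) ++ cs.drop (j + 1) := by
  intro n
  induction n with
  | zero =>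
    intro cs i j hn hij hj
    rw [pvGoB]
    have hnl : ¬ i < j := by omega
    simp only [hnl, dite_false]
    exact pvGoB_base cs i j hnl hij hj
  | succ n ih =>
    intro cs i j hn hij hj
    rw [pvGoB]
    by_cases hlt : i < j
    · simp only [hlt, dite_true]
      have hi : i < cs.length := by omega
      have hgi : cs.getD i ' ' = cs[i] := List.getD_eq_getElem cs ' ' hi
      have hgj : cs.getD j ' ' = cs[j] := List.getD_eq_getElem cs ' ' hj
      have hseg : (cs.drop i).take (j + 1 - i) = cs[i] :: (cs.drop (i+1)).take (j - i) := by
        rw [List.drop_eq_getElem_cons hi]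
        have : j + 1 - i = (j - i) + 1 := by omega
        rw [this, List.take_succ_cons]
      by_cases hci : PySem.Chars.isalnum cs[i]
      · by_cases hcj : PySem.Chars.isalnum cs[j]
        · -- swap case
          simp only [hgi, hgj, hci, hcj, not_true, if_false]
          rw [pvSwap_decomp cs i j cs[j] cs[i] hlt hj hi]
          set M := (cs.drop (i+1)).take (j - i - 1) with hM
          have hMlen : M.length = j - i - 1 := by
            rw [hM]; simp; omega
          set cs' := cs.take i ++ cs[j] :: (M ++ cs[i] :: cs.drop (j+1)) with hcs'
          have hlen' : cs'.length = cs.length := by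
            rw [hcs']; simp [hMlen]; omega
          rw [ih cs' (i+1) (j-1) (by omega) (by omega) (by omega)]
          have hti : (cs.take i).length = i := by simp; omega
          have htake' : cs'.take (i+1) = cs.take i ++ [cs[j]] := by
            rw [hcs']
            have : i + 1 = (cs.take i).length + 1 := by omega
            rw [this, List.take_length_add_append, List.take_succ_cons, List.take_zero]
          have hdrop' : cs'.drop (j - 1 + 1) = cs[i] :: cs.drop (j+1) := by
            rw [hcs']
            have : j - 1 + 1 = (cs.take i).length + (1 + M.length) := by omega
            rw [this, List.drop_length_add_append]
            have h1 : 1 + M.length = M.length + 1 := by omega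
            rw [h1, List.drop_succ_cons, List.drop_left]
          have hmid' : (cs'.drop (i+1)).take (j - 1 + 1 - (i + 1)) = M := by
            rw [hcs']
            have h2 : j - 1 + 1 - (i + 1) = M.length := by omega
            rw [h2]
            have h3 : i + 1 = (cs.take i).length + 1 := by omega
            rw [h3, List.drop_length_add_append, List.drop_succ_cons, List.drop_zero, List.take_left]
          rw [htake', hdrop', hmid']
          have hsegfull : (cs.drop i).take (j + 1 - i) = cs[i] :: (M ++ [cs[j]]) := by
            rw [hseg]
            congr 1
            have hji2 : j - i = (j - i - 1) + 1 := by omega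
            rw [hji2, List.take_succ]
            have hsome : (cs.drop (i+1))[j - i - 1]? = some cs[j] := by
              rw [List.getElem?_drop]
              have : i + 1 + (j - i - 1) = j := by omega
              rw [this]
              exact List.getElem?_eq_getElem hj
            rw [hsome, hM]
            rfl
          rw [hsegfull]
          have := pvSpec_swap cs[i] cs[j] M hci hcj
          rw [show (cs[i] :: (M ++ [cs[j]])) = (cs[i] :: M ++ [cs[j]]) by simp] at *
          rw [this]
          simp
        · -- cs[j] not alnum: retreat right pointer
          rw [if_neg (show ¬¬PySem.Chars.isalnum (cs.getD i ' ') = true by rw [hgi]; simp [hci]),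
            if_pos (show ¬PySem.Chars.isalnum (cs.getD j ' ') = true by rw [hgj]; simp [hcj])]
          rw [ih cs i (j-1) (by omega) (by omega) (by omega)]
          have hjj : j - 1 + 1 = j := by omega
          rw [hjj]
          have hseg2 : (cs.drop i).take (j + 1 - i)
              = (cs.drop i).take (j - i) ++ [cs[j]] := by
            have h3 : j + 1 - i = (j - i) + 1 := by omega
            rw [h3, List.take_succ]
            have hsome : (cs.drop i)[j - i]? = some cs[j] := by
              rw [List.getElem?_drop]
              have : i + (j - i) = j := by omega
              rw [this]
              exact List.getElem?_eq_getElem hj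
            rw [hsome]
            rfl
          rw [hseg2, pvSpec_append_not _ _ hcj]
          rw [List.drop_eq_getElem_cons hj]
          simp
      · -- cs[i] not alnum: advance left pointer
        rw [if_pos (show ¬PySem.Chars.isalnum (cs.getD i ' ') = true by rw [hgi]; simp [hci])]
        rw [ih cs (i+1) j (by omega) (by omega) hj]
        have h4 : j + 1 - (i + 1) = j - i := by omega
        rw [h4, hseg, pvSpec_cons_not _ _ hci]
        have htki : cs.take (i+1) = cs.take i ++ [cs[i]] := by
          rw [List.take_succ, List.getElem?_eq_getElem hi]
          rfl
        rw [htki]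
        simp only [List.append_assoc, List.singleton_append]
    · simp only [hlt, dite_false]
      exact pvGoB_base cs i j hlt hij hj

theorem rev_only_alnums_eq_spec (s : String) :
    rev_only_alnums s = String.mk (pvSpec s.toList) := by
  unfold rev_only_alnums pvSpec
  congr 1
  have := pvGoA_eq_merge s.toList ((s.toList.filter PySem.Chars.isalnum).reverse)
  rw [List.reverse_reverse] at this
  exact this

theorem rev_only_alnums_alt_eq_spec (s : String) :
    rev_only_alnums_alt s = String.mk (pvSpec s.toList) := by
  unfold rev_only_alnums_alt
  congr 1
  cases hl : s.toList with
  | nil => rw [pvGoB]; simp [pvSpec_nil]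
  | cons c t =>
    have hlen : (c :: t).length - 1 < (c :: t).length := by simp
    rw [pvGoB_eq ((c :: t).length - 1) (c :: t) 0 ((c :: t).length - 1) (by omega) (by omega) hlen]
    have h5 : (c :: t).length - 1 + 1 = (c :: t).length := by simp
    rw [h5]
    simp

-- ===== VERDICT (by name: the statement is the Claim_ definition above) =====
theorem rev_only_alnums_spec : Claim_equal_rev_only_alnums := by
  intro s _hDom
  unfold Spec_rev_only_alnums
  rw [rev_only_alnums_eq_spec, rev_only_alnums_alt_eq_spec]
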